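-- pv_equiv track=rewrite | github.com/zacharygilmour/lab03 | duplicate.py | singlify
-- ===== SOURCE A (Python) =====
-- def singlify(str):
--     words = str.split(' ')
--     dictionary = {}
--     for word in words:
--         if word not in dictionary:
--             dictionary[word.lower()] = 1
--
--     return ' '.join(sorted(dictionary))
--     pass
-- ===== SOURCE B (Python) =====
-- def singlify(str):
--     # sort-then-adjacent-dedup instead of a dict: lowercase all words, sort,
--     # keep each word only when it differs from the previously kept one.
--     lows = sorted(w.lower() for w in str.split(' '))
--     out = []
--     for w in lows:
--         if not out or out[-1] != w:
--             out.append(w)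
--     return ' '.join(out)
-- ===== Notes on version B (the rewrite author's own statement) =====
-- stated objective: alternative
-- what changed: Replaces the dict/hash-based dedup (conditional insert of lowercased keys, then sort the keys) with sort-then-adjacent-dedup: lowercase all words, sort the whole list, and drop adjacent duplicates in one pass.
import Mathlib
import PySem

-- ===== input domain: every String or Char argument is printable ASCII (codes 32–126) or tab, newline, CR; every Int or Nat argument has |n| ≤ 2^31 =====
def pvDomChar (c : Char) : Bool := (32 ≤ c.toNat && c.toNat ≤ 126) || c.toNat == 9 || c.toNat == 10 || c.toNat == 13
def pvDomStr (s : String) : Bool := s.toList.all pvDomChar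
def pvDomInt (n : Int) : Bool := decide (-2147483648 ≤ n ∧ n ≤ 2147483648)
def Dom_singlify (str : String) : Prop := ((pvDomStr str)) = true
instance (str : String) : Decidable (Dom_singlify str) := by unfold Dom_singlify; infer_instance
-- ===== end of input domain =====

-- B replaces A's dict-based dedup of lowercased words with sort-then-adjacent-dedup; same output, proved equal.


-- ===== PORT A =====
def singlify (str : String) : String :=
  let words := (PySem.Str.split? str " ").getD []
  let dictionary := words.foldl
    (fun d word => if d.contains word then d else d.insert (PySem.Str.lower word) (1 : Int))
    (PySem.Dict.empty : PySem.Dict String Int)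
  PySem.Str.join " " (PySem.List.sorted dictionary.keys (fun x => x))

-- ===== PORT B =====
def singlify_alt (str : String) : String :=
  let lows := PySem.List.sorted (((PySem.Str.split? str " ").getD []).map PySem.Str.lower) (fun x => x)
  let out := lows.foldl
    (fun acc w => if acc.isEmpty || (acc.getLast? != some w) then acc ++ [w] else acc)
    ([] : List String)
  PySem.Str.join " " out

-- ===== PRECONDITION & SPEC =====
def Spec_singlify (str : String) (out : String) : Prop := out = singlify_alt str
instance (str : String) (out : String) : Decidable (Spec_singlify str out) := by unfold Spec_singlify; infer_instance

-- ===== CLAIM (what is proved, stated in full; the proofs are below) =====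
def Claim_equal_singlify : Prop := ∀ (str : String), Dom_singlify str → Spec_singlify str (singlify str)

-- ===== LEMMAS AND PROOFS =====

theorem pvLowerCharIdem (c : Char) :
    PySem.Chars.lowerChar (PySem.Chars.lowerChar c) = PySem.Chars.lowerChar c := by
  unfold PySem.Chars.lowerChar PySem.Chars.isupper
  by_cases h : 'A' ≤ c ∧ c ≤ 'Z'
  · have h65 : 65 ≤ c.toNat := h.1
    have h90 : c.toNat ≤ 90 := h.2
    have hv : (c.toNat + 32).isValidChar := Or.inl (by omega)
    have ht : (Char.ofNat (c.toNat + 32)).toNat = c.toNat + 32 := by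
      simp [Char.ofNat, Char.ofNatAux, hv]
      omega
    have hnu : ¬ ('A' ≤ Char.ofNat (c.toNat + 32) ∧ Char.ofNat (c.toNat + 32) ≤ 'Z') := by
      intro hc
      have : (Char.ofNat (c.toNat + 32)).toNat ≤ 90 := hc.2
      omega
    simp [h.1, h.2, hnu]
  · simp only [Bool.and_eq_true, decide_eq_true_eq]
    rw [if_neg h, if_neg h]

theorem pvLowerIdem (w : String) :
    PySem.Str.lower (PySem.Str.lower w) = PySem.Str.lower w := by
  simp only [PySem.Str.lower, PySem.Chars.lower]
  congr 1
  simp [List.map_map, Function.comp_def, pvLowerCharIdem]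

-- adjacent dedup, recursively, carrying the previously kept element (characterises B's fold)
def pvDDx : Option String → List String → List String
  | _, [] => []
  | prev, w :: t => if prev = some w then pvDDx prev t else w :: pvDDx (some w) t
theorem pvFoldlDD : ∀ (s acc : List String),
    s.foldl (fun acc w => if acc.isEmpty || (acc.getLast? != some w) then acc ++ [w] else acc) acc
      = acc ++ pvDDx acc.getLast? s
  | [], acc => by simp [pvDDx]
  | w :: t, acc => by
    by_cases h : acc.getLast? = some w
    · have hne : acc.isEmpty = false := by
        cases acc with
        | nil => simp at h
        | cons a l => rfl
      have hc : (acc.isEmpty || (acc.getLast? != some w)) = false := by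
        simp [hne, h]
      simp only [List.foldl_cons, hc, Bool.false_eq_true, if_false]
      rw [pvFoldlDD t acc, h]
      simp [pvDDx]
    · have : (acc.isEmpty || (acc.getLast? != some w)) = true := by
        simp [bne_iff_ne, h]
      rw [List.foldl_cons, if_pos this, pvFoldlDD t (acc ++ [w])]
      simp [pvDDx, h]

theorem pvDDSpec : ∀ (s : List String) (prev : Option String),
    s.Pairwise (· ≤ ·) → (∀ x ∈ s, ∀ p, prev = some p → p ≤ x) →
    (pvDDx prev s).Pairwise (· < ·) ∧ (∀ x, x ∈ pvDDx prev s ↔ x ∈ s ∧ prev ≠ some x)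
  | [], prev, _, _ => by simp [pvDDx]
  | w :: t, prev, hs, hp => by
    have hst := (List.pairwise_cons.mp hs)
    by_cases h : prev = some w
    · have ih := pvDDSpec t prev hst.2 (fun x hx p hpp => by
        rw [h] at hpp; cases hpp; exact hst.1 x hx)
      refine ⟨(by simpa only [pvDDx, if_pos h] using ih.1), fun x => ?_⟩
      simp only [pvDDx, if_pos h, (ih.2 x), List.mem_cons]
      constructor
      · rintro ⟨hx, hne⟩; exact ⟨Or.inr hx, hne⟩
      · rintro ⟨rfl | hx, hne⟩
        · exact absurd h hne
        · exact ⟨hx, hne⟩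
    · have ih := pvDDSpec t (some w) hst.2 (fun x hx p hpp => by
        cases hpp; exact hst.1 x hx)
      simp only [pvDDx, if_neg h]
      constructor
      · refine List.pairwise_cons.mpr ⟨fun y hy => ?_, ih.1⟩
        have hmem := (ih.2 y).mp hy
        exact lt_of_le_of_ne (hst.1 y hmem.1) (fun he => hmem.2 (by rw [he]))
      · intro x
        simp only [List.mem_cons, (ih.2 x)]
        constructor
        · rintro (rfl | ⟨hx, hne⟩)
          · exact ⟨Or.inl rfl, fun he => h he⟩
          · refine ⟨Or.inr hx, fun he => ?_⟩
            have hxw : x ≤ w := hp w (List.mem_cons_self) x he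
            have hwx : w ≤ x := hst.1 x hx
            exact hne (by rw [le_antisymm hxw hwx])
        · rintro ⟨rfl | hx, hne⟩
          · exact Or.inl rfl
          · by_cases hxw : x = w
            · exact Or.inl hxw
            · exact Or.inr ⟨hx, fun he => hxw (Option.some.inj he).symm⟩

theorem pvFoldKeys : ∀ (ws : List String) (d : PySem.Dict String Int),
    (∀ k ∈ d.keys, PySem.Str.lower k = k) → d.keys.Nodup →
    (∀ x, x ∈ (ws.foldl (fun d word => if d.contains word then d else d.insert (PySem.Str.lower word) (1 : Int)) d).keys
        ↔ x ∈ d.keys ∨ x ∈ ws.map PySem.Str.lower)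
    ∧ (∀ k ∈ (ws.foldl (fun d word => if d.contains word then d else d.insert (PySem.Str.lower word) (1 : Int)) d).keys,
        PySem.Str.lower k = k)
    ∧ (ws.foldl (fun d word => if d.contains word then d else d.insert (PySem.Str.lower word) (1 : Int)) d).keys.Nodup
  | [], d, hinv, hnd => by simpa using ⟨hinv, hnd⟩
  | w :: t, d, hinv, hnd => by
    rw [List.foldl_cons]
    by_cases h : d.contains w = true
    · have hw : w ∈ d.keys := (PySem.Dict.contains_iff_mem_keys d w).mp h
      have hlw : PySem.Str.lower w ∈ d.keys := by rw [hinv w hw]; exact hw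
      have ih := pvFoldKeys t d hinv hnd
      rw [if_pos h]
      refine ⟨fun x => ?_, ih.2.1, ih.2.2⟩
      rw [(ih.1 x)]
      simp only [List.map_cons, List.mem_cons]
      constructor
      · rintro (hx | hx)
        · exact Or.inl hx
        · exact Or.inr (Or.inr hx)
      · rintro (hx | rfl | hx)
        · exact Or.inl hx
        · exact Or.inl hlw
        · exact Or.inr hx
    · rw [if_neg h]
      have hinv' : ∀ k ∈ (d.insert (PySem.Str.lower w) (1 : Int)).keys, PySem.Str.lower k = k := by
        intro k hk
        rcases (PySem.Dict.mem_keys_insert d (PySem.Str.lower w) k (1 : Int)).mp hk with rfl | hk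
        · exact pvLowerIdem w
        · exact hinv k hk
      have ih := pvFoldKeys t (d.insert (PySem.Str.lower w) (1 : Int)) hinv'
        (PySem.Dict.nodup_keys_insert d (PySem.Str.lower w) (1 : Int) hnd)
      refine ⟨fun x => ?_, ih.2.1, ih.2.2⟩
      rw [(ih.1 x)]
      simp only [PySem.Dict.mem_keys_insert, List.map_cons, List.mem_cons]
      tauto

-- ===== VERDICT (by name: the statement is the Claim_ definition above) =====
theorem singlify_spec : Claim_equal_singlify := by
  intro str _
  unfold Spec_singlify singlify singlify_alt
  simp only []
  set words := (PySem.Str.split? str " ").getD [] with hwdef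
  set s := PySem.List.sorted (words.map PySem.Str.lower) (fun x => x) with hsdef
  rw [pvFoldlDD]
  have hA := pvFoldKeys words (PySem.Dict.empty : PySem.Dict String Int)
    (by simp [PySem.Dict.keys_empty]) (by simp [PySem.Dict.keys_empty])
  have hdd := pvDDSpec s none (PySem.List.sorted_pairwise _ _) (by simp)
  have hnd : (pvDDx none s).Nodup := hdd.1.imp (fun h => ne_of_lt h)
  have hperm : (pvDDx ([] : List String).getLast? s).Perm
      ((words.foldl (fun d word => if d.contains word then d else d.insert (PySem.Str.lower word) (1 : Int))
        (PySem.Dict.empty : PySem.Dict String Int)).keys) := by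
    refine (List.perm_ext_iff_of_nodup hnd hA.2.2).mpr (fun a => ?_)
    rw [(hdd.2 a), hA.1 a, hsdef, PySem.List.mem_sorted]
    simp [PySem.Dict.keys_empty]
  rw [PySem.List.sorted_eq_of_perm_of_pairwise_lt _ _ _ hperm
    (by simpa using hdd.1)]
  simp
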